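-- pv_equiv track=rewrite | github.com/shamsham228/ff-guest-bot | proxy_manager.py | is_banned_response
-- ===== SOURCE A (Python) =====
-- BAN_STATUS_CODES = {403, 429, 503, 407, 401}
--
-- BAN_KEYWORDS     = [
--     "banned", "blocked", "rate limit", "too many",
--     "captcha", "forbidden", "access denied", "ip blocked"
-- ]
--
-- def is_banned_response(status_code: int, content: str = "") -> bool:
--     """Check if response indicates ban/block"""
--     if status_code in BAN_STATUS_CODES:
--         return True
--
--     content_lower = content.lower()
--     for keyword in BAN_KEYWORDS:
--         if keyword in content_lower:
--             return True
--
--     return False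
-- ===== SOURCE B (Python) =====
-- BAN_STATUS_CODES = {403, 429, 503, 407, 401}
--
-- BAN_KEYWORDS = [
--     "banned", "blocked", "rate limit", "too many",
--     "captcha", "forbidden", "access denied", "ip blocked"
-- ]
--
-- def is_banned_response(status_code: int, content: str = "") -> bool:
--     """Check if response indicates ban/block"""
--     if status_code in BAN_STATUS_CODES:
--         return True
--     # Single left-to-right NFA-style scan: 'active' holds the remaining suffixes of
--     # keywords whose prefix matched ending just before the current position.
--     active = []
--     for ch in content.lower():
--         nxt = []
--         for rem in BAN_KEYWORDS + active:
--             if rem[0] == ch: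
--                 if len(rem) == 1:
--                     return True
--                 nxt.append(rem[1:])
--         active = nxt
--     return False
-- ===== Notes on version B (the rewrite author's own statement) =====
-- stated objective: alternative
-- what changed: Replaces the loop of independent per-keyword substring searches with a single left-to-right NFA-style scan of the lowered content that maintains the set of active partial keyword matches and reports a hit the moment one completes.
import Mathlib
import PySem

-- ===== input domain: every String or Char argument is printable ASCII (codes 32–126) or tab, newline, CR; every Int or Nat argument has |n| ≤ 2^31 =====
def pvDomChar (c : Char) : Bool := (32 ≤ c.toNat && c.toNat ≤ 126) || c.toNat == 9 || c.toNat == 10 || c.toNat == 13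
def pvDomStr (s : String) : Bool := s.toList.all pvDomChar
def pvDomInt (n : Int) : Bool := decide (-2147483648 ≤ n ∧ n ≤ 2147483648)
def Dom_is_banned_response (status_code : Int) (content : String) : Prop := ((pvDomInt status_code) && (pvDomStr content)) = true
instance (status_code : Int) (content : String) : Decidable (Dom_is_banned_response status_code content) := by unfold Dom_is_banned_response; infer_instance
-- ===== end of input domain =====

-- B replaces A's per-keyword substring searches with ONE left-to-right scan of the content
-- that maintains the set of active partial keyword matches (NFA-style multi-pattern matching);
-- objective: alternative (same cost class, genuinely different traversal).
-- ===== PORT A =====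
def pvBanStatusCodes : PySem.Set Int := PySem.Set.ofList [403, 429, 503, 407, 401]

def pvBanKeywords : List (List Char) :=
  ["banned".toList, "blocked".toList, "rate limit".toList, "too many".toList,
   "captcha".toList, "forbidden".toList, "access denied".toList, "ip blocked".toList]

def is_banned_response (status_code : Int) (content : String) : Bool :=
  if PySem.Set.contains pvBanStatusCodes status_code then true
  else
    let content_lower := PySem.Chars.lower content.toList
    -- for keyword in BAN_KEYWORDS: if keyword in content_lower: return True
    pvBanKeywords.any (fun keyword => PySem.Chars.isIn keyword content_lower)

-- ===== PORT B =====
-- inner 'for rem in BAN_KEYWORDS + active' loop of Source B: advance every candidate by ch;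
-- 'none' = the Python 'return True' (a candidate completed).  The '[] :: rs' arm is
-- unreachable in Python (candidates are always nonempty there); we skip such an element.
def pvAdvance (ch : Char) : List (List Char) → Option (List (List Char))
  | [] => some []
  | (c :: cs) :: rs =>
      if c = ch then
        if cs = [] then none               -- len(rem) == 1: return True
        else match pvAdvance ch rs with
          | none => none
          | some l => some (cs :: l)       -- nxt.append(rem[1:])
      else pvAdvance ch rs
  | [] :: rs => pvAdvance ch rs

-- outer 'for ch in content.lower()' loop of Source B
def pvScan : List Char → List (List Char) → Bool
  | [], _ => false
  | ch :: rest, active =>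
      match pvAdvance ch (pvBanKeywords ++ active) with
      | none => true
      | some nxt => pvScan rest nxt

def is_banned_response_alt (status_code : Int) (content : String) : Bool :=
  if PySem.Set.contains pvBanStatusCodes status_code then true
  else pvScan (PySem.Chars.lower content.toList) []

-- ===== PRECONDITION & SPEC =====
def Spec_is_banned_response (status_code : Int) (content : String) (out : Bool) : Prop := out = is_banned_response_alt status_code content
instance (status_code : Int) (content : String) (out : Bool) : Decidable (Spec_is_banned_response status_code content out) := by unfold Spec_is_banned_response; infer_instance

-- ===== CLAIM (what is proved, stated in full; the proofs are below) =====
def Claim_equal_is_banned_response : Prop := ∀ (status_code : Int) (content : String), Dom_is_banned_response status_code content → Spec_is_banned_response status_code content (is_banned_response status_code content)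

-- ===== LEMMAS AND PROOFS =====

-- the step function: what one character does to a candidate suffix
def pvStepF (ch : Char) (rem : List Char) : Option (List Char) :=
  match rem with
  | [] => none
  | c :: cs => if c = ch ∧ cs ≠ [] then some cs else none

lemma pvStepF_eq_some {ch : Char} {rem cs : List Char} :
    pvStepF ch rem = some cs ↔ rem = ch :: cs ∧ cs ≠ [] := by
  cases rem with
  | nil => simp [pvStepF]
  | cons c t =>
    simp only [pvStepF]
    split_ifs with h
    · obtain ⟨h1, h2⟩ := h
      subst h1
      constructor
      · rintro h; cases h; exact ⟨rfl, h2⟩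
      · rintro ⟨h, _⟩; cases h; rfl
    · constructor
      · rintro h; cases h
      · rintro ⟨h, h2⟩; cases h; exact absurd ⟨rfl, h2⟩ h

lemma pvAdvance_none {ch : Char} {l : List (List Char)} :
    pvAdvance ch l = none ↔ ∃ rem ∈ l, rem = [ch] := by
  induction l with
  | nil => simp [pvAdvance]
  | cons rem rs ih =>
    cases rem with
    | nil =>
      simp only [pvAdvance, ih, List.mem_cons]
      constructor
      · rintro ⟨r, hr, h⟩; exact ⟨r, Or.inr hr, h⟩
      · rintro ⟨r, hr | hr, h⟩
        · cases hr; cases h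
        · exact ⟨r, hr, h⟩
    | cons c cs =>
      simp only [pvAdvance]
      split_ifs with hc hcs
      · subst hc; subst hcs
        simp
      · subst hc
        constructor
        · intro h
          cases hadv : pvAdvance c rs with
          | none =>
            obtain ⟨r, hr, hh⟩ := ih.mp hadv
            exact ⟨r, List.mem_cons_of_mem _ hr, hh⟩
          | some m => rw [hadv] at h; cases h
        · rintro ⟨r, hr, hh⟩
          rcases List.mem_cons.mp hr with h1 | h1
          · exfalso; rw [h1] at hh; cases hh; exact hcs rfl
          · rw [ih.mpr ⟨r, h1, hh⟩]
      · rw [ih]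
        constructor
        · rintro ⟨r, hr, hh⟩; exact ⟨r, List.mem_cons_of_mem _ hr, hh⟩
        · rintro ⟨r, hr, hh⟩
          rcases List.mem_cons.mp hr with h1 | h1
          · exfalso; rw [h1] at hh; cases hh; exact hc rfl
          · exact ⟨r, h1, hh⟩

lemma pvAdvance_some {ch : Char} {l : List (List Char)}
    (h : ¬ ∃ rem ∈ l, rem = [ch]) :
    pvAdvance ch l = some (l.filterMap (pvStepF ch)) := by
  induction l with
  | nil => simp [pvAdvance]
  | cons rem rs ih =>
    have hrs : ¬ ∃ r ∈ rs, r = [ch] := by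
      rintro ⟨r, hr, hh⟩; exact h ⟨r, List.mem_cons_of_mem _ hr, hh⟩
    cases rem with
    | nil => simpa [pvAdvance, pvStepF] using ih hrs
    | cons c cs =>
      simp only [pvAdvance]
      split_ifs with hc hcs
      · exfalso; subst hc; subst hcs; exact h ⟨[c], List.mem_cons_self .., rfl⟩
      · rw [ih hrs]
        simp [pvStepF, hc, hcs]
      · rw [ih hrs]
        simp [pvStepF, hc]

lemma keywords_ne_nil : ∀ k ∈ pvBanKeywords, k ≠ [] := by decide

-- scan invariant: true iff some keyword occurs in cl, or some active candidate completes as a prefix of cl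
lemma pvScan_iff (cl : List Char) : ∀ (active : List (List Char)),
    pvScan cl active = true ↔
      (∃ k ∈ pvBanKeywords, k <:+: cl) ∨ (∃ rem ∈ active, rem ≠ [] ∧ rem <+: cl) := by
  induction cl with
  | nil =>
    intro active
    simp only [pvScan]
    constructor
    · intro h; cases h
    · rintro (⟨k, hk, hin⟩ | ⟨r, _, hne, hpre⟩)
      · exact absurd (List.eq_nil_of_infix_nil hin) (keywords_ne_nil k hk)
      · exact absurd (List.prefix_nil.mp hpre) hne
  | cons ch rest ih =>
    intro active
    simp only [pvScan]
    by_cases hnone : ∃ rem ∈ pvBanKeywords ++ active, rem = [ch]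
    · rw [pvAdvance_none.mpr hnone]
      simp only [true_iff]
      obtain ⟨rem, hmem, hrem⟩ := hnone
      rcases List.mem_append.mp hmem with hk | ha
      · exact Or.inl ⟨rem, hk, by rw [hrem]; exact (List.cons_prefix_cons.mpr ⟨rfl, List.nil_prefix⟩).isInfix⟩
      · exact Or.inr ⟨rem, ha, by rw [hrem]; exact ⟨by simp, List.cons_prefix_cons.mpr ⟨rfl, List.nil_prefix⟩⟩⟩
    · rw [pvAdvance_some hnone]
      simp only [ih]
      constructor
      · rintro (⟨k, hk, hin⟩ | ⟨cs, hcs, _, hpre⟩)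
        · exact Or.inl ⟨k, hk, List.infix_cons hin⟩
        · obtain ⟨rem, hmem, hstep⟩ := List.mem_filterMap.mp hcs
          obtain ⟨hrem, hne⟩ := pvStepF_eq_some.mp hstep
          subst hrem
          rcases List.mem_append.mp hmem with hk | ha
          · exact Or.inl ⟨ch :: cs, hk, (List.cons_prefix_cons.mpr ⟨rfl, hpre⟩).isInfix⟩
          · exact Or.inr ⟨ch :: cs, ha, by simp, List.cons_prefix_cons.mpr ⟨rfl, hpre⟩⟩
      · rintro (⟨k, hk, hin⟩ | ⟨rem, ha, hne, hpre⟩)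
        · rcases List.infix_cons_iff.mp hin with hpre | hin
          · obtain ⟨c, cs, rfl⟩ : ∃ c cs, k = c :: cs := by
              cases k with
              | nil => exact absurd rfl (keywords_ne_nil _ hk)
              | cons c cs => exact ⟨c, cs, rfl⟩
            obtain ⟨hc, hcs⟩ : c = ch ∧ cs <+: rest := by
              obtain ⟨t, ht⟩ := hpre
              cases ht
              exact ⟨rfl, ⟨t, rfl⟩⟩
            subst hc
            cases hcse : cs with
            | nil =>
              exfalso; subst hcse
              exact hnone ⟨[c], List.mem_append_left _ hk, rfl⟩
            | cons d ds =>
              subst hcse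
              refine Or.inr ⟨d :: ds, List.mem_filterMap.mpr ⟨c :: d :: ds, List.mem_append_left _ hk, ?_⟩, by simp, hcs⟩
              exact pvStepF_eq_some.mpr ⟨rfl, by simp⟩
          · exact Or.inl ⟨k, hk, hin⟩
        · obtain ⟨c, cs, rfl⟩ : ∃ c cs, rem = c :: cs := by
            cases rem with
            | nil => exact absurd rfl hne
            | cons c cs => exact ⟨c, cs, rfl⟩
          obtain ⟨hc, hcs⟩ : c = ch ∧ cs <+: rest := by
            obtain ⟨t, ht⟩ := hpre
            cases ht
            exact ⟨rfl, ⟨t, rfl⟩⟩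
          subst hc
          cases hcse : cs with
          | nil =>
            exfalso; subst hcse
            exact hnone ⟨[c], List.mem_append_right _ ha, rfl⟩
          | cons d ds =>
            subst hcse
            refine Or.inr ⟨d :: ds, List.mem_filterMap.mpr ⟨c :: d :: ds, List.mem_append_right _ ha, ?_⟩, by simp, hcs⟩
            exact pvStepF_eq_some.mpr ⟨rfl, by simp⟩

-- ===== VERDICT (by name: the statement is the Claim_ definition above) =====
theorem is_banned_response_spec : Claim_equal_is_banned_response := by
  intro status_code content _
  unfold Spec_is_banned_response is_banned_response is_banned_response_alt
  by_cases h : PySem.Set.contains pvBanStatusCodes status_code = true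
  · rw [if_pos h, if_pos h]
  · rw [if_neg h, if_neg h]
    rw [Bool.eq_iff_iff, pvScan_iff]
    simp only [List.any_eq_true, PySem.Chars.isIn_iff_infix, List.not_mem_nil,
      false_and, exists_false, or_false]
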